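-- pv_equiv track=rewrite | github.com/roccomoresi/archivosImportantes | tpsProgra/tpsAlgYEstr/04/11.py | reemplazar_palabra
-- ===== SOURCE A (Python) =====
-- def reemplazar_palabra(cadena, palabra_buscar, palabra_reemplazar):
--     palabras = cadena.split()
--     contador_reemplazos = 0
--
--     for i in range(len(palabras)):
--         if palabras[i] == palabra_buscar:
--             palabras[i] = palabra_reemplazar
--             contador_reemplazos += 1
--
--     cadena_actualizada = ' '.join(palabras)
--     return cadena_actualizada, contador_reemplazos
-- ===== SOURCE B (Python) =====
-- def _emitir(resultado, contador, hay_palabras, actual, palabra_buscar, palabra_reemplazar):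
--     if actual == palabra_buscar:
--         actual = palabra_reemplazar
--         contador += 1
--     if hay_palabras:
--         resultado = resultado + " " + actual
--     else:
--         resultado = actual
--     return resultado, contador, True
--
--
-- def reemplazar_palabra(cadena, palabra_buscar, palabra_reemplazar):
--     # single character-level scan: tokenize, substitute and rebuild in one pass,
--     # never materializing the word list
--     resultado = ""
--     contador = 0
--     hay_palabras = False
--     actual = ""
--     for c in cadena:
--         if c.isspace():
--             if actual:
--                 resultado, contador, hay_palabras = _emitir(
--                     resultado, contador, hay_palabras, actual,
--                     palabra_buscar, palabra_reemplazar)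
--                 actual = ""
--         else:
--             actual += c
--     if actual:
--         resultado, contador, hay_palabras = _emitir(
--             resultado, contador, hay_palabras, actual,
--             palabra_buscar, palabra_reemplazar)
--     return resultado, contador
-- ===== Notes on version B (the rewrite author's own statement) =====
-- stated objective: alternative
-- what changed: Replaces A's split-into-a-word-list / index-loop-with-in-place-assignment / join pipeline by a single character-level scan that tokenizes the string itself, substituting and appending each finished word to the output as it is completed, never materializing the word list.
import Mathlib
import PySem

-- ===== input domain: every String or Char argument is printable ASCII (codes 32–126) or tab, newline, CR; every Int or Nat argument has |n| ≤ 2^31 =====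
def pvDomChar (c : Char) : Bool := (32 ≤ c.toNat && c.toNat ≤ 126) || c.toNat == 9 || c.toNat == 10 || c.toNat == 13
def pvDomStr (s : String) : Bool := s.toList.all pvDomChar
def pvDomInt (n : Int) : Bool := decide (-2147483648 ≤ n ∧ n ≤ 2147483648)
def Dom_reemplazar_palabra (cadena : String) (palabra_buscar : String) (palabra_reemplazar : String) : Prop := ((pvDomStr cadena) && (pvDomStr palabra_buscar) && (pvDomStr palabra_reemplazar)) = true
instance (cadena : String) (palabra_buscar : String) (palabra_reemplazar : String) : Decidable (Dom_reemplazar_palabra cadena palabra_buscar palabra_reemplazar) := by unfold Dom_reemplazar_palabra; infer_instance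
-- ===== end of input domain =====

-- B replaces A's split-into-a-word-list / index-loop / join pipeline by a single
-- character-level scan that tokenizes, substitutes and rebuilds the string in one
-- pass, never materializing the word list; same result, alternative algorithm.

-- ===== PORT A =====
def reemplazar_palabra (cadena : String) (palabra_buscar : String) (palabra_reemplazar : String) : String × Int :=
  let palabras := PySem.Str.split₀ cadena
  let st := (PySem.List.pyRange 0 palabras.length 1).foldl
    (fun (st : List String × Int) i =>
      if PySem.List.pyGetD st.1 i "" == palabra_buscar then
        (PySem.List.pySetD st.1 i palabra_reemplazar, st.2 + 1)
      else st)
    (palabras, 0)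
  (PySem.Str.join " " st.1, st.2)

-- ===== PORT B =====
-- Source B's _emitir: flush the current word into the output being built
def rpEmitir (resultado : List Char) (contador : Int) (hay_palabras : Bool)
    (actual buscar reemplazo : List Char) : List Char × Int × Bool :=
  let palabra := if actual = buscar then reemplazo else actual
  let contador' := if actual = buscar then contador + 1 else contador
  (if hay_palabras then resultado ++ ' ' :: palabra else palabra, contador', true)

-- Source B's for-loop over the characters of cadena (strings built by += as List Char)
def rpLoop (buscar reemplazo : List Char) :
    List Char → List Char → Int → Bool → List Char → List Char × Int
  | [], resultado, contador, hay_palabras, actual =>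
      if actual.isEmpty then (resultado, contador)
      else
        let st := rpEmitir resultado contador hay_palabras actual buscar reemplazo
        (st.1, st.2.1)
  | c :: cs, resultado, contador, hay_palabras, actual =>
      if PySem.Chars.isspace c then
        if actual.isEmpty then rpLoop buscar reemplazo cs resultado contador hay_palabras []
        else
          let st := rpEmitir resultado contador hay_palabras actual buscar reemplazo
          rpLoop buscar reemplazo cs st.1 st.2.1 st.2.2 []
      else rpLoop buscar reemplazo cs resultado contador hay_palabras (actual ++ [c])

def reemplazar_palabra_alt (cadena : String) (palabra_buscar : String) (palabra_reemplazar : String) : String × Int :=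
  let p := rpLoop palabra_buscar.toList palabra_reemplazar.toList cadena.toList [] 0 false []
  (String.ofList p.1, p.2)

-- ===== PRECONDITION & SPEC =====
def Spec_reemplazar_palabra (cadena : String) (palabra_buscar : String) (palabra_reemplazar : String) (out : String × Int) : Prop := out = reemplazar_palabra_alt cadena palabra_buscar palabra_reemplazar
instance (cadena : String) (palabra_buscar : String) (palabra_reemplazar : String) (out : String × Int) : Decidable (Spec_reemplazar_palabra cadena palabra_buscar palabra_reemplazar out) := by unfold Spec_reemplazar_palabra; infer_instance

-- ===== CLAIM (what is proved, stated in full; the proofs are below) =====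
def Claim_equal_reemplazar_palabra : Prop := ∀ (cadena : String) (palabra_buscar : String) (palabra_reemplazar : String), Dom_reemplazar_palabra cadena palabra_buscar palabra_reemplazar → Spec_reemplazar_palabra cadena palabra_buscar palabra_reemplazar (reemplazar_palabra cadena palabra_buscar palabra_reemplazar)

-- ===== LEMMAS AND PROOFS =====

-- A's loop over indices k, k+1, …, k+|ws| acting on acc ++ ws (|acc| = k) rewrites exactly
-- the ws part to its substituted image and adds the number of matches to the counter.
lemma reemplazar_loop_spec (b r : String) :
    ∀ (ws acc : List String) (c : Int),
      (PySem.List.pyRange (acc.length : Int) ((acc.length : Int) + ws.length) 1).foldl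
        (fun (st : List String × Int) i =>
          if PySem.List.pyGetD st.1 i "" == b then
            (PySem.List.pySetD st.1 i r, st.2 + 1)
          else st)
        (acc ++ ws, c)
      = (acc ++ ws.map (fun w => if w == b then r else w), c + (ws.count b : Int)) := by
  intro ws
  induction ws with
  | nil =>
    intro acc c
    simp [PySem.List.pyRange]
  | cons w ws ih =>
    intro acc c
    have hlt : (acc.length : Int) < (acc.length : Int) + (w :: ws).length := by
      simp only [List.length_cons]; push_cast; omega
    rw [PySem.List.pyRange_one_cons hlt]
    simp only [List.foldl_cons]
    have hget : PySem.List.pyGetD (acc ++ w :: ws) (acc.length : Int) "" = w := by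
      simp [PySem.List.pyGetD_natCast, List.getD]
    by_cases hw : w == b
    · have hset : PySem.List.pySetD (acc ++ w :: ws) (acc.length : Int) r
          = (acc ++ [r]) ++ ws := by
        simp [PySem.List.pySetD_natCast, List.set_append_right, List.set_cons_zero]
      rw [if_pos (by simp [hget, hw])]
      simp only [hset]
      have := ih (acc ++ [r]) (c + 1)
      have hlen : ((acc ++ [r]).length : Int) = (acc.length : Int) + 1 := by simp
      rw [hlen] at this
      have harr : (acc.length : Int) + ((w :: ws).length : Int)
          = (acc.length : Int) + 1 + (ws.length : Int) := by simp; omega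
      rw [harr, this]
      have hb : w = b := by simpa using hw
      simp [hb]
      omega
    · rw [if_neg (by simp [hget, hw])]
      have := ih (acc ++ [w]) c
      have hlen : ((acc ++ [w]).length : Int) = (acc.length : Int) + 1 := by simp
      rw [hlen] at this
      have harr : (acc.length : Int) + ((w :: ws).length : Int)
          = (acc.length : Int) + 1 + (ws.length : Int) := by simp; omega
      rw [harr]
      have hstate : acc ++ w :: ws = (acc ++ [w]) ++ ws := by simp
      rw [hstate, this]
      simp [hw, List.count_cons]
      intro h
      exact absurd (by simp [h]) hw

-- split₀.go's accumulator holds, reversed, the words already produced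
lemma split0_go_acc :
    ∀ (cs cur : List Char) (acc : List (List Char)),
      PySem.Chars.split₀.go cs cur acc
        = acc.reverse ++ PySem.Chars.split₀.go cs cur [] := by
  intro cs
  induction cs with
  | nil =>
    intro cur acc
    by_cases h : cur.isEmpty <;> simp [PySem.Chars.split₀.go, h]
  | cons c cs ih =>
    intro cur acc
    by_cases hs : PySem.Chars.isspace c
    · by_cases hc : cur.isEmpty
      · simp only [PySem.Chars.split₀.go, hs, hc, if_true]
        exact ih [] acc
      · simp only [PySem.Chars.split₀.go, hs, hc, if_true, if_false, Bool.false_eq_true]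
        rw [ih [] (cur.reverse :: acc), ih [] [cur.reverse]]
        simp
    · simp only [PySem.Chars.split₀.go, hs, Bool.false_eq_true, if_false]
      exact ih (c :: cur) acc

-- ' '.join over a word appended at the right
lemma join_snoc (sep : List Char) (xs : List (List Char)) (y : List Char) :
    PySem.Chars.join sep (xs ++ [y])
      = if xs.isEmpty then y else PySem.Chars.join sep xs ++ sep ++ y := by
  induction xs with
  | nil => simp [PySem.Chars.join_singleton]
  | cons x xs ih =>
    cases xs with
    | nil => simp [PySem.Chars.join_cons_cons, PySem.Chars.join_singleton]
    | cons x' xs' =>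
      simp only [List.cons_append, PySem.Chars.join_cons_cons] at ih ⊢
      rw [ih]
      simp

lemma emit_join (bs rs : List Char) (ws : List (List Char)) (actual : List Char) :
    (if (!ws.isEmpty) = true then
        PySem.Chars.join [' '] (ws.map (fun w => if w = bs then rs else w)) ++
          ' ' :: (if actual = bs then rs else actual)
      else (if actual = bs then rs else actual))
    = PySem.Chars.join [' '] ((ws ++ [actual]).map (fun w => if w = bs then rs else w)) := by
  rw [List.map_append, List.map_singleton, join_snoc]
  by_cases hw : ws.isEmpty <;> simp [hw, List.isEmpty_map]

-- B's scan, started with the words ws already emitted, produces exactly the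
-- substituted join of ws and the words split₀ finds in the rest of the input,
-- and adds the number of matches among the new words to the counter.
lemma rpLoop_spec (bs rs : List Char) :
    ∀ (cs actual : List Char) (ws : List (List Char)) (c : Int),
      rpLoop bs rs cs
          (PySem.Chars.join [' '] (ws.map (fun w => if w = bs then rs else w)))
          c (!ws.isEmpty) actual
        = (PySem.Chars.join [' ']
            ((ws ++ PySem.Chars.split₀.go cs actual.reverse []).map
              (fun w => if w = bs then rs else w)),
           c + ((PySem.Chars.split₀.go cs actual.reverse []).count bs : Int)) := by
  intro cs
  induction cs with
  | nil =>
    intro actual ws c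
    by_cases ha : actual.isEmpty
    · simp [rpLoop, PySem.Chars.split₀.go, ha]
    · have hrev : actual.reverse.isEmpty = false := by
        simp_all [List.isEmpty_iff]
      simp only [rpLoop, ha, Bool.false_eq_true, if_false, PySem.Chars.split₀.go, hrev,
        List.reverse_reverse, rpEmitir]
      rw [emit_join]
      by_cases hb : actual = bs <;> simp [hb]
  | cons ch cs ih =>
    intro actual ws c
    by_cases hs : PySem.Chars.isspace ch
    · by_cases ha : actual.isEmpty
      · have hrev' : actual.reverse = [] := by simp_all [List.isEmpty_iff]
        simp only [rpLoop, hs, ha, if_true]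
        have key := ih [] ws c
        simp only [List.reverse_nil] at key
        rw [key]
        simp [PySem.Chars.split₀.go, hs, hrev']
      -- flush the finished word, then continue with ws ++ [actual]
      · have hrev : actual.reverse.isEmpty = false := by simp_all [List.isEmpty_iff]
        simp only [rpLoop, hs, ha, Bool.false_eq_true, if_false, if_true, rpEmitir]
        rw [emit_join]
        have key := ih [] (ws ++ [actual]) (if actual = bs then c + 1 else c)
        simp only [List.reverse_nil] at key
        have hflag : (!(ws ++ [actual]).isEmpty) = true := by simp
        rw [hflag] at key
        rw [key]
        have hgo : PySem.Chars.split₀.go (ch :: cs) actual.reverse []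
            = [actual] ++ PySem.Chars.split₀.go cs [] [] := by
          simp only [PySem.Chars.split₀.go, hs, hrev, if_true, Bool.false_eq_true, if_false]
          rw [split0_go_acc cs [] [actual.reverse.reverse]]
          simp
        rw [hgo, Prod.mk.injEq]
        constructor
        · rw [List.append_assoc]
        · simp only [List.count_append]
          by_cases hb : actual = bs <;> simp [hb] <;> omega
    · simp only [rpLoop, hs, Bool.false_eq_true, if_false]
      have key := ih (actual ++ [ch]) ws c
      rw [key]
      simp [PySem.Chars.split₀.go, hs]

-- substitution commutes with packing the split words into Strings
lemma map_subst_ofList (b r : String) (l : List (List Char)) :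
    (l.map String.ofList).map (fun w => if w == b then r else w)
      = (l.map (fun w => if w = b.toList then r.toList else w)).map String.ofList := by
  simp only [List.map_map]
  apply List.map_congr_left
  intro w _
  by_cases h : w = b.toList
  · simp [h, String.ofList_toList]
  · simp only [Function.comp_def, h, if_false]
    rw [if_neg]
    intro hb
    have hbeq : String.ofList w = b := by simpa using hb
    exact h (by rw [← hbeq, String.toList_ofList])

-- ' '.join on packed words is the packed char-level join
lemma join_ofList (l : List (List Char)) :
    PySem.Str.join " " (l.map String.ofList) = String.ofList (PySem.Chars.join [' '] l) := by
  simp only [PySem.Str.join, List.map_map]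
  have h2 : l.map (String.toList ∘ String.ofList) = l := by
    simp [Function.comp_def]
  rw [h2]
  rfl

-- counting a word among packed words is counting it at the char level
lemma count_ofList (b : String) (l : List (List Char)) :
    (l.map String.ofList).count b = l.count b.toList := by
  rw [List.count_eq_countP, List.count_eq_countP, List.countP_map]
  apply List.countP_congr
  intro w _
  by_cases h : w = b.toList
  · simp [h, String.ofList_toList]
  · have hne : (String.ofList w == b) = false := by
      simp only [beq_eq_false_iff_ne, ne_eq]
      intro hb
      exact h (by rw [← hb, String.toList_ofList])
    simp [hne, h]

-- ===== VERDICT (by name: the statement is the Claim_ definition above) =====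
theorem reemplazar_palabra_spec : Claim_equal_reemplazar_palabra := by
  intro cadena b r _
  show reemplazar_palabra cadena b r = reemplazar_palabra_alt cadena b r
  unfold reemplazar_palabra reemplazar_palabra_alt
  have hA := reemplazar_loop_spec b r (PySem.Str.split₀ cadena) [] 0
  simp only [List.length_nil, Nat.cast_zero, zero_add, List.nil_append] at hA
  simp only [hA]
  have hB := rpLoop_spec b.toList r.toList cadena.toList [] [] 0
  simp only [List.reverse_nil, List.nil_append, List.map_nil, PySem.Chars.join_nil,
    List.isEmpty_nil, Bool.not_true, zero_add] at hB
  rw [hB]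
  have hsplit : PySem.Str.split₀ cadena
      = (PySem.Chars.split₀.go cadena.toList [] []).map String.ofList := rfl
  rw [hsplit, map_subst_ofList, join_ofList, count_ofList]
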